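-- pv_equiv track=rewrite | github.com/JanPhilipp-Bullenkamp/MorseMesh | src/Algorithms/LoadData/Datastructure.py | compare_heights
-- ===== SOURCE A (Python) =====
-- def compare_heights(small, big):
--     """! @brief Compares two tuples of sorted values.
--
--     @details Compares two sorted tuples of possibly different length and returns True if the second
--     one is considered larger and False if the first one is considered larger. Tuples are higher
--     if their highest (first) value is larger than the highest value of the other tuple and shorter
--     tuples are higher than longer if all values are equal up to the length of the shorter tuple.
--     For example the following tuples are sorted from high to low:
--
--     (4), (4,3), (3,2,2), (3,2,1), (2), (2,9), (2,7), (2,9,15)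
--
--     @param small First tuple to be compared.
--     @param big Second tuple to be compared.
--
--     @return True if small is smaller than big according to the metric. False otherwise.
--     """
--     # return True if small is smaller than big, False otherwise
--     if len(small) == len(big):
--         for i in range(len(small)):
--             if small[i] < big[i]:
--                 return True
--             elif small[i] > big[i]:
--                 return False
--         return False
--     if len(small) < len(big):
--         for i in range(len(small)):
--             if small[i] < big[i]:
--                 return True
--             elif small[i] > big[i]:
--                 return False
--         return False
--     if len(small) > len(big):
--         for i in range(len(big)):
--             if small[i] < big[i]:
--                 return True
--             elif small[i] > big[i]:
--                 return False
--         return True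
-- ===== SOURCE B (Python) =====
-- _INF = 1 << 62  # larger than any element admitted (|n| <= 2**31)
--
-- def compare_heights(small, big):
--     n = max(len(small), len(big))
--     s = list(small) + [_INF] * (n - len(small))
--     b = list(big) + [_INF] * (n - len(big))
--     return s < b
-- ===== Notes on version B (the rewrite author's own statement) =====
-- stated objective: idiomatic
-- what changed: Replaces the three length-branching index loops by padding both tuples to equal length with a sentinel larger than any admitted element and delegating to Python's native list comparison, which realises the shorter-is-higher tie-break automatically.
import Mathlib
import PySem

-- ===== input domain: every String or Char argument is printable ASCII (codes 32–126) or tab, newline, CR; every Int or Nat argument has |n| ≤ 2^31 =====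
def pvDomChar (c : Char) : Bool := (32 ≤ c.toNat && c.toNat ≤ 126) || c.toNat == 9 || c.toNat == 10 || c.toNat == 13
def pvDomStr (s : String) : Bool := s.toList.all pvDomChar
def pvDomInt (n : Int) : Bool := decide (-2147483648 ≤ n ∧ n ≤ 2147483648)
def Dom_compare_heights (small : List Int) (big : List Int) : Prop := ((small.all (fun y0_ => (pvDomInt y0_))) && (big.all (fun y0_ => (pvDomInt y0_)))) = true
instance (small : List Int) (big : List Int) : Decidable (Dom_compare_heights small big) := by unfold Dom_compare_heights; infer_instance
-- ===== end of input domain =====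

-- B pads both lists to equal length with a sentinel larger than any admitted element and
-- uses a single lexicographic list comparison (Python's native `<`); no length branching.

-- ===== PORT A =====
-- the element-wise loop shared by A's three branches (each iterates min(len) times,
-- returning early at the first differing pair; none = the loop fell through)
def chLoop : List Int → List Int → Option Bool
  | x :: xs, y :: ys =>
    if x < y then some true
    else if x > y then some false
    else chLoop xs ys
  | _, _ => none

def compare_heights (small : List Int) (big : List Int) : Bool :=
  if small.length = big.length then (chLoop small big).getD false
  else if small.length < big.length then (chLoop small big).getD false
  else (chLoop small big).getD true

-- ===== PORT B =====
def pvInf : Int := 4611686018427387904  -- 1 << 62, Source B's _INF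

-- Python's native `<` on lists of ints, exactly (shorter prefix compares smaller)
def pyListLt : List Int → List Int → Bool
  | [], [] => false
  | [], _ :: _ => true
  | _ :: _, [] => false
  | x :: xs, y :: ys =>
    if x < y then true
    else if y < x then false
    else pyListLt xs ys

def compare_heights_alt (small : List Int) (big : List Int) : Bool :=
  let n := max small.length big.length
  let s := small ++ List.replicate (n - small.length) pvInf
  let b := big ++ List.replicate (n - big.length) pvInf
  pyListLt s b

-- ===== PRECONDITION & SPEC =====
def Spec_compare_heights (small : List Int) (big : List Int) (out : Bool) : Prop := out = compare_heights_alt small big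
instance (small : List Int) (big : List Int) (out : Bool) : Decidable (Spec_compare_heights small big out) := by unfold Spec_compare_heights; infer_instance

-- ===== CLAIM (what is proved, stated in full; the proofs are below) =====
def Claim_equal_compare_heights : Prop := ∀ (small : List Int) (big : List Int), Dom_compare_heights small big → Spec_compare_heights small big (compare_heights small big)

-- ===== LEMMAS AND PROOFS =====

theorem ch_main : ∀ (small big : List Int), Dom_compare_heights small big →
    compare_heights small big = compare_heights_alt small big := by
  intro small
  induction small with
  | nil =>
    intro big hd
    cases big with
    | nil => decide
    | cons y ys =>
      simp only [Dom_compare_heights, List.all_cons, List.all_nil, Bool.and_eq_true,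
        pvDomInt, decide_eq_true_eq] at hd
      have hy : y < pvInf := by unfold pvInf; omega
      simp [compare_heights, compare_heights_alt, chLoop, List.replicate_succ, pyListLt,
        hy, not_lt.mpr (le_of_lt hy)]
  | cons x xs ih =>
    intro big hd
    cases big with
    | nil =>
      simp only [Dom_compare_heights, List.all_cons, List.all_nil, Bool.and_eq_true,
        pvDomInt, decide_eq_true_eq] at hd
      have hx : x < pvInf := by unfold pvInf; omega
      simp [compare_heights, compare_heights_alt, chLoop, List.replicate_succ, pyListLt, hx]
    | cons y ys =>
      simp only [Dom_compare_heights, List.all_cons, Bool.and_eq_true] at hd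
      obtain ⟨⟨hx, hxs⟩, hy, hys⟩ := hd
      have hdt : Dom_compare_heights xs ys := by
        simp [Dom_compare_heights, hxs, hys]
      simp only [pvDomInt, decide_eq_true_eq] at hx hy
      rcases lt_trichotomy x y with hlt | heq | hgt
      · simp [compare_heights, compare_heights_alt, chLoop, hlt, pyListLt, List.cons_append]
      · subst heq
        have ha : compare_heights (x :: xs) (x :: ys) = compare_heights xs ys := by
          simp [compare_heights, chLoop]
        have hb : compare_heights_alt (x :: xs) (x :: ys) = compare_heights_alt xs ys := by
          simp [compare_heights_alt, pyListLt, List.cons_append]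
        rw [ha, hb]; exact ih ys hdt
      · have hnlt : ¬ x < y := not_lt.mpr (le_of_lt hgt)
        simp [compare_heights, compare_heights_alt, chLoop, hgt, hnlt,
          pyListLt, List.cons_append]

-- ===== VERDICT (by name: the statement is the Claim_ definition above) =====
theorem compare_heights_spec : Claim_equal_compare_heights := by
  intro small big hd
  unfold Spec_compare_heights
  exact ch_main small big hd
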